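-- pv_equiv track=rewrite | github.com/mtnakayama/spicy-strings | spicystrings/ahk_parser.py | parse_hotstring_line
-- ===== SOURCE A (Python) =====
-- from enum import auto, Enum
-- from typing import NamedTuple
--
-- class Hotstring(NamedTuple):
--     options: str
--     hotstring: str
--     replacement: str
--
-- class ParseHotstringState(Enum):
--     START = auto()
--     OPTIONS = auto()
--     HOTSTRING = auto()
--     HOTSTRING_FIRST_COLON = auto()
--     REPLACEMENT = auto()
--
-- def parse_hotstring_line(line: str) -> Hotstring:
--     parse_state = ParseHotstringState.START
--
--     for i, char in enumerate(line):
--         if parse_state == ParseHotstringState.START: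
--             if char != ':':
--                 raise ValueError
--             substring_start = i + 1
--             parse_state = ParseHotstringState.OPTIONS
--         elif parse_state == ParseHotstringState.OPTIONS:
--             if char == ':':
--                 options = line[substring_start:i]
--                 substring_start = i + 1
--                 parse_state = ParseHotstringState.HOTSTRING
--         elif parse_state == ParseHotstringState.HOTSTRING:
--             if char == ':':
--                 parse_state = ParseHotstringState.HOTSTRING_FIRST_COLON
--         elif parse_state == ParseHotstringState.HOTSTRING_FIRST_COLON:
--             if char == ':':
--                 hotstring = line[substring_start:i-1]
--                 substring_start = i + 1
--                 parse_state = ParseHotstringState.REPLACEMENT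
--             else:
--                 parse_state = ParseHotstringState.HOTSTRING
--         else:
--             break  # rest of line is replacement text
--
--     if parse_state != ParseHotstringState.REPLACEMENT:
--         raise ValueError
--
--     replacement = line[substring_start:]
--
--     return Hotstring(options, hotstring, replacement)
-- ===== SOURCE B (Python) =====
-- from typing import NamedTuple
--
--
-- class Hotstring(NamedTuple):
--     options: str
--     hotstring: str
--     replacement: str
--
--
-- def parse_hotstring_line(line: str) -> Hotstring:
--     # Locate the delimiters directly instead of running a character state machine.
--     if not line.startswith(':'):
--         raise ValueError
--     j = line.find(':', 1)
--     if j == -1: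
--         raise ValueError
--     k = line.find('::', j + 1)
--     if k == -1:
--         raise ValueError
--     return Hotstring(line[1:j], line[j + 1:k], line[k + 2:])
-- ===== Notes on version B (the rewrite author's own statement) =====
-- stated objective: idiomatic
-- what changed: Replaces the five-state per-character parser with direct delimiter location: startswith(':'), find(':', 1) for the end of the options, find('::', j+1) for the separator, then three slices.
import Mathlib
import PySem

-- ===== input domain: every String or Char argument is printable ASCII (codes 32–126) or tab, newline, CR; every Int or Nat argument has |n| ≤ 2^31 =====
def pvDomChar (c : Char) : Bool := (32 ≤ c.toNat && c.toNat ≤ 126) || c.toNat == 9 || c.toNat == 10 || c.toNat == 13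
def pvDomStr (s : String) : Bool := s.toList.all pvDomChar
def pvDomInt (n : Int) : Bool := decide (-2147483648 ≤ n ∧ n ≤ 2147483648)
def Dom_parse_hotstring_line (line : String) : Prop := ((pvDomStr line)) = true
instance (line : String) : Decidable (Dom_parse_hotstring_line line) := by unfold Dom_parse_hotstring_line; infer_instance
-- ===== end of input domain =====

-- B replaces A's five-state per-character parser by direct delimiter location (startswith / find / slices); Pre_ excludes exactly the inputs on which A raises ValueError.


-- ===== PORT A =====
-- A's parser state (ParseHotstringState) together with the live local variables of
-- each state: substring_start, options, hotstring; `fail` models the immediate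
-- `raise ValueError` of the START state.
inductive AState : Type
  | start : AState
  | options : Nat → AState                        -- substring_start
  | hot : List Char → Nat → AState                -- options, substring_start
  | fc : List Char → Nat → AState                 -- options, substring_start (HOTSTRING_FIRST_COLON)
  | repl : List Char → List Char → Nat → AState   -- options, hotstring, substring_start
  | fail : AState
deriving DecidableEq, Repr

-- the `for i, char in enumerate(line)` loop of A, step for step
def loopA (l : List Char) : List Char → Nat → AState → AState
  | [], _, st => st
  | c :: rest, i, st =>
    match st with
    | .start => if c ≠ ':' then .fail else loopA l rest (i+1) (.options (i+1))
    | .options ss =>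
        if c = ':' then
          loopA l rest (i+1) (.hot (PySem.List.slice l (some (ss : Int)) (some (i : Int))) (i+1))
        else loopA l rest (i+1) (.options ss)
    | .hot o ss => if c = ':' then loopA l rest (i+1) (.fc o ss) else loopA l rest (i+1) (.hot o ss)
    | .fc o ss =>
        if c = ':' then
          loopA l rest (i+1) (.repl o (PySem.List.slice l (some (ss : Int)) (some ((i : Int) - 1))) (i+1))
        else loopA l rest (i+1) (.hot o ss)
    | .repl o h ss => .repl o h ss                -- `break`: rest of line is replacement text
    | .fail => .fail

def parse_hotstring_line (line : String) : String × String × String :=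
  match loopA line.toList line.toList 0 .start with
  | .repl o h ss =>
      (String.ofList o, String.ofList h,
       String.ofList (PySem.List.slice line.toList (some (ss : Int)) none))
  | _ => ("", "", "")                             -- `raise ValueError` (excluded by Pre_)

-- ===== PORT B =====
def parse_hotstring_line_alt (line : String) : String × String × String :=
  if PySem.Str.startswith line ":" then
    let j := PySem.Str.findFrom line ":" 1
    if j = -1 then ("", "", "")                   -- raise ValueError (excluded by Pre_)
    else
      let k := PySem.Str.findFrom line "::" (j + 1)
      if k = -1 then ("", "", "")                 -- raise ValueError (excluded by Pre_)
      else (PySem.Str.slice line (some 1) (some j),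
            PySem.Str.slice line (some (j + 1)) (some k),
            PySem.Str.slice line (some (k + 2)) none)
  else ("", "", "")                               -- raise ValueError (excluded by Pre_)

-- ===== PRECONDITION & SPEC =====
-- Pre_ is exactly where A returns normally: the line starts with ':', has a second
-- colon closing the options, and a '::' separator after it; everywhere else A raises ValueError.
def Pre_parse_hotstring_line (line : String) : Prop :=
  PySem.Str.startswith line ":" = true ∧
  PySem.Str.findFrom line ":" 1 ≠ -1 ∧
  PySem.Str.findFrom line "::" (PySem.Str.findFrom line ":" 1 + 1) ≠ -1
instance (line : String) : Decidable (Pre_parse_hotstring_line line) := by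
  unfold Pre_parse_hotstring_line; infer_instance

def pvWitness_parse_hotstring_line : String := ":*:btw::by the way"

def Spec_parse_hotstring_line (line : String) (out : String × String × String) : Prop := out = parse_hotstring_line_alt line
instance (line : String) (out : String × String × String) : Decidable (Spec_parse_hotstring_line line out) := by unfold Spec_parse_hotstring_line; infer_instance

-- ===== CLAIM (what is proved, stated in full; the proofs are below) =====
def Claim_equal_parse_hotstring_line : Prop := ∀ (line : String), Dom_parse_hotstring_line line → Pre_parse_hotstring_line line → Spec_parse_hotstring_line line (parse_hotstring_line line)

-- ===== LEMMAS AND PROOFS =====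

-- a one- or two-character prefix of a suffix is one or two indexed characters
theorem prefix_one_iff (s : List Char) (p : Nat) (c : Char) :
    [c] <+: s.drop p ↔ s[p]? = some c := by
  have h0 : (s.drop p)[0]? = s[p]? := by simp [List.getElem?_drop]
  rw [← h0]
  cases h : s.drop p with
  | nil => simp
  | cons a t => simp [List.cons_prefix_cons, eq_comm]

theorem prefix_two_iff (s : List Char) (p : Nat) (c d : Char) :
    [c, d] <+: s.drop p ↔ (s[p]? = some c ∧ s[p+1]? = some d) := by
  have h0 : (s.drop p)[0]? = s[p]? := by simp [List.getElem?_drop]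
  have h1 : (s.drop p)[1]? = s[p+1]? := by simp [List.getElem?_drop]
  rw [← h0, ← h1]
  cases h : s.drop p with
  | nil => simp
  | cons a t =>
    cases t with
    | nil => simp [List.cons_prefix_cons, eq_comm]
    | cons b u => simp [List.cons_prefix_cons, eq_comm]

-- once REPLACEMENT is reached the loop breaks
theorem loopA_repl (l s : List Char) (i : Nat) (o h : List Char) (ss : Nat) :
    loopA l s i (.repl o h ss) = .repl o h ss := by
  cases s <;> rfl

-- OPTIONS phase: the scan stops at the first colon of the suffix
theorem loopA_opt (l : List Char) (m : Nat) :
    ∀ (s : List Char) (i ss : Nat), s[m]? = some ':' → (∀ p, p < m → s[p]? ≠ some ':') →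
    loopA l s i (.options ss) =
      loopA l (s.drop (m+1)) (i+m+1)
        (.hot (PySem.List.slice l (some (ss : Int)) (some ((i+m : Nat) : Int))) (i+m+1)) := by
  induction m with
  | zero =>
    intro s i ss hm _
    cases s with
    | nil => simp at hm
    | cons c rest =>
      have hc : c = ':' := by simpa using hm
      subst hc
      simp [loopA]
  | succ m ih =>
    intro s i ss hm hmin
    cases s with
    | nil => simp at hm
    | cons c rest =>
      have hc : c ≠ ':' := by
        have := hmin 0 (Nat.succ_pos m); simpa using this
      have step : loopA l (c :: rest) i (.options ss) = loopA l rest (i+1) (.options ss) := by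
        simp [loopA, hc]
      rw [step, ih rest (i+1) ss (by simpa using hm)
        (fun p hp => by have := hmin (p+1) (by omega); simpa using this)]
      have e1 : i + 1 + m = i + (m+1) := by omega
      rw [e1]
      rfl

-- HOTSTRING/FIRST_COLON phase: the scan stops at the first adjacent '::' of the suffix
theorem loopA_hot (l : List Char) (o : List Char) (ss : Nat) (m : Nat) :
    ∀ (s : List Char) (i : Nat), s[m]? = some ':' → s[m+1]? = some ':' →
    (∀ p, p < m → ¬(s[p]? = some ':' ∧ s[p+1]? = some ':')) →
    loopA l s i (.hot o ss) =
      .repl o (PySem.List.slice l (some (ss : Int)) (some ((i+m : Nat) : Int))) (i+m+2) := by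
  induction m using Nat.strong_induction_on with
  | _ m ih =>
    intro s i hm hm1 hmin
    match m with
    | 0 =>
      cases s with
      | nil => simp at hm
      | cons c rest =>
        have hc : c = ':' := by simpa using hm
        cases rest with
        | nil => simp at hm1
        | cons d u =>
          have hd : d = ':' := by simpa using hm1
          subst hc; subst hd
          have e : ((i+1 : Nat) : Int) - 1 = ((i+0 : Nat) : Int) := by push_cast; ring
          simp only [loopA, loopA_repl, e]
          norm_num
    | N+1 =>
      cases s with
      | nil => simp at hm
      | cons c rest =>
        by_cases hc : c = ':'
        · subst hc
          have h1 : rest[0]? ≠ some ':' := by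
            have := hmin 0 (by omega); simpa using this
          cases rest with
          | nil => simp at hm
          | cons d u =>
            have hd : d ≠ ':' := by simpa using h1
            match N with
            | 0 => exact absurd (by simpa using hm) hd
            | M+1 =>
              have step : loopA l (':' :: d :: u) i (.hot o ss) = loopA l u (i+2) (.hot o ss) := by
                simp [loopA, hd]
              rw [step, ih M (by omega) u (i+2) (by simpa using hm) (by simpa using hm1)
                (fun p hp => by have := hmin (p+2) (by omega); simpa using this)]
              have e1 : i + 2 + M = i + (M+1+1) := by omega
              rw [e1]
        · have step : loopA l (c :: rest) i (.hot o ss) = loopA l rest (i+1) (.hot o ss) := by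
            simp [loopA, hc]
          rw [step, ih N (by omega) rest (i+1) (by simpa using hm) (by simpa using hm1)
            (fun p hp => by have := hmin (p+1) (by omega); simpa using this)]
          have e1 : i + 1 + N = i + (N+1) := by omega
          rw [e1]

-- ===== VERDICT (by name: the statement is the Claim_ definition above) =====
theorem parse_hotstring_line_spec : Claim_equal_parse_hotstring_line := by
  intro line _ hpre
  obtain ⟨hsw, hj, hk⟩ := hpre
  unfold Spec_parse_hotstring_line
  refine Eq.symm ?_
  have hsw0 := hsw
  simp only [PySem.Str.startswith_eq] at hsw
  rw [PySem.Chars.startswith_iff] at hsw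
  simp only [PySem.Str.findFrom_eq] at hj hk
  set l := line.toList with hl
  -- l = ':' :: t
  have hcol : ":".toList = [':'] := by decide
  have hcol2 : "::".toList = [':', ':'] := by decide
  rw [hcol] at hsw
  have hlen1 : 1 ≤ l.length := by
    rcases hsw with ⟨u, hu⟩; rw [← hu]; simp
  -- first find
  rw [show (1:Int) = ((1:Nat):Int) by norm_num, hcol,
      PySem.Chars.findFrom_natCast _ _ 1 hlen1] at hj
  set f := PySem.Chars.find (l.drop 1) [':'] with hf
  have hfne : f ≠ -1 := by intro h; rw [h] at hj; simp at hj
  have hf0 : 0 ≤ f := by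
    have := PySem.Chars.neg_one_le_find (l.drop 1) [':']
    omega
  set fn := f.toNat with hfn
  have hspec1 := PySem.Chars.find_spec (s := l.drop 1) (sub := [':']) hf0
  obtain ⟨hpre1, hmin1⟩ := hspec1
  rw [List.drop_drop] at hpre1
  rw [← hf, ← hfn] at hmin1
  have hfind1 : PySem.Chars.findFrom l [':'] (1:Int) none = ((1+fn : Nat) : Int) := by
    rw [show (1:Int) = ((1:Nat):Int) by norm_num,
        PySem.Chars.findFrom_natCast _ _ 1 hlen1, ← hf, if_neg hfne]
    push_cast [← hfn]; omega
  set jn : Nat := 1 + fn with hjn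
  -- the colon at index jn
  have hljn : l[jn]? = some ':' := by
    have h := (prefix_one_iff l jn ':').mp ?_
    · exact h
    · rw [hjn, Nat.add_comm 1 fn] at hpre1 ⊢; exact hpre1
  have hjnlt : jn < l.length := by
    rcases List.getElem?_eq_some_iff.mp hljn with ⟨h, -⟩; exact h
  -- second find
  rw [hcol, hcol2, hfind1,
      show (((1+fn : Nat):Int) + 1) = ((jn+1 : Nat) : Int) by rw [hjn]; push_cast; ring,
      PySem.Chars.findFrom_natCast _ _ (jn+1) (by omega)] at hk
  set g := PySem.Chars.find (l.drop (jn+1)) [':',':'] with hg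
  have hgne : g ≠ -1 := by intro h; rw [h] at hk; simp at hk
  have hg0 : 0 ≤ g := by
    have := PySem.Chars.neg_one_le_find (l.drop (jn+1)) [':',':']
    omega
  set gn := g.toNat with hgn
  obtain ⟨hpre2, hmin2⟩ := PySem.Chars.find_spec (s := l.drop (jn+1)) (sub := [':',':']) hg0
  rw [← hg, ← hgn] at hpre2 hmin2
  set kn : Nat := jn + 1 + gn with hkn
  have hfind2 : PySem.Chars.findFrom l [':',':'] ((jn+1 : Nat):Int) none = ((kn : Nat) : Int) := by
    rw [PySem.Chars.findFrom_natCast _ _ (jn+1) (by omega), ← hg, if_neg hgne]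
    rw [hkn]; push_cast [← hgn]; omega
  -- decompose l
  obtain ⟨t, ht⟩ : ∃ t, l = ':' :: t := by
    rcases hsw with ⟨u, hu⟩; exact ⟨u, hu.symm⟩
  have htdrop : t = l.drop 1 := by rw [ht]; rfl
  -- ===== A side =====
  have hstep0 : loopA l l 0 .start = loopA l t 1 (.options 1) := by
    rw [ht]; simp [loopA]
  have hA1 : t[fn]? = some ':' := by
    rw [htdrop, List.getElem?_drop]
    rw [show 1 + fn = jn from hjn.symm]
    exact hljn
  have hA2 : ∀ p, p < fn → t[p]? ≠ some ':' := by
    intro p hp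
    have h := hmin1 p hp
    rw [prefix_one_iff] at h
    rw [htdrop]; exact h
  have hAeq : parse_hotstring_line line = (String.ofList (PySem.List.slice l (some ((1:Nat):Int)) (some ((jn:Nat):Int))),
      String.ofList (PySem.List.slice l (some ((jn+1 : Nat):Int)) (some ((kn : Nat):Int))),
      String.ofList (PySem.List.slice l (some ((kn+2 : Nat):Int)) none)) := by
    unfold parse_hotstring_line
    rw [← hl, hstep0, loopA_opt l fn t 1 1 hA1 hA2]
    have hd : t.drop (fn+1) = l.drop (jn+1) := by
      rw [htdrop, List.drop_drop, hjn]; ring_nf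
    have he : 1 + fn + 1 = jn + 1 := by omega
    rw [hd, he]
    have hB1 : (l.drop (jn+1))[gn]? = some ':' := ((prefix_two_iff _ gn ':' ':').mp hpre2).1
    have hB2 : (l.drop (jn+1))[gn+1]? = some ':' := ((prefix_two_iff _ gn ':' ':').mp hpre2).2
    have hB3 : ∀ p, p < gn → ¬((l.drop (jn+1))[p]? = some ':' ∧ (l.drop (jn+1))[p+1]? = some ':') := by
      intro p hp hcontra
      exact hmin2 p hp ((prefix_two_iff _ p ':' ':').mpr hcontra)
    rw [loopA_hot l _ _ gn (l.drop (jn+1)) (jn+1) hB1 hB2 hB3]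
  -- ===== B side =====
  have hBeq : parse_hotstring_line_alt line = (String.ofList (PySem.List.slice l (some ((1:Nat):Int)) (some ((jn:Nat):Int))),
      String.ofList (PySem.List.slice l (some ((jn+1 : Nat):Int)) (some ((kn : Nat):Int))),
      String.ofList (PySem.List.slice l (some ((kn+2 : Nat):Int)) none)) := by
    unfold parse_hotstring_line_alt
    rw [hsw0]
    simp only [if_true]
    have e1 : PySem.Str.findFrom line ":" 1 = ((jn : Nat) : Int) := by
      simp only [PySem.Str.findFrom_eq, hcol, ← hl]
      exact_mod_cast hfind1
    rw [e1]
    rw [if_neg (by omega : ¬ ((jn : Nat) : Int) = -1)]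
    have e2 : PySem.Str.findFrom line "::" (((jn : Nat) : Int) + 1) = ((kn : Nat) : Int) := by
      simp only [PySem.Str.findFrom_eq, hcol2, ← hl]
      rw [show ((jn : Nat) : Int) + 1 = ((jn + 1 : Nat) : Int) by push_cast; ring]
      exact_mod_cast hfind2
    rw [e2]
    rw [if_neg (by omega : ¬ ((kn : Nat) : Int) = -1)]
    have c1 : PySem.Str.slice line (some 1) (some ((jn : Nat) : Int)) =
        String.ofList (PySem.List.slice l (some ((1:Nat):Int)) (some ((jn:Nat):Int))) := by
      refine String.toList_inj.mp ?_
      simp [PySem.Str.toList_slice, ← hl]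
    have c2 : PySem.Str.slice line (some (((jn : Nat) : Int) + 1)) (some ((kn : Nat) : Int)) =
        String.ofList (PySem.List.slice l (some ((jn+1 : Nat):Int)) (some ((kn : Nat):Int))) := by
      refine String.toList_inj.mp ?_
      simp [PySem.Str.toList_slice, ← hl]
    have c3 : PySem.Str.slice line (some (((kn : Nat) : Int) + 2)) none =
        String.ofList (PySem.List.slice l (some ((kn+2 : Nat):Int)) none) := by
      refine String.toList_inj.mp ?_
      simp [PySem.Str.toList_slice, ← hl]
    rw [c1, c2, c3]
  rw [hAeq, hBeq]
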